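-- pv_equiv track=rewrite | github.com/Srinivas11789/AlgorithmNuggets | ProblemSolving/anagram/anagram.py | anagaram
-- ===== SOURCE A (Python) =====
-- def anagaram(s):
--
--     # convert string to list and length
--     s = list(s)
--     n = len(s)
--
--     # odd condition
--     if n%2 != 0:
--         return -1
--
--     # even condition - split
--     mid = n//2
--     left = s[:mid]
--     right = s[mid:]
--
--     # O(N)
--     # remove all similar elements from the array
--     # remaining is the one to be changed!
--     for i in range(len(left)):
--         if left[i] in right:
--             right.pop(right.index(left[i]))
--
--     return len(right)
--
--
--     """
--     # only a few passes O(N2)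
--     count = 0
--     for i in range(len(left)):
--         for j in range(len(right)):
--             if left[i] == right[j]:
--                 count += 1
--                 break
--
--     return len(left) - count
--     """
-- ===== SOURCE B (Python) =====
-- def anagaram(s):
--     n = len(s)
--     if n % 2 != 0:
--         return -1
--     mid = n // 2
--     left = s[:mid]
--     right = s[mid:]
--     return sum(max(0, right.count(c) - left.count(c)) for c in set(right))
-- ===== Notes on version B (the rewrite author's own statement) =====
-- stated objective: simpler
-- what changed: Replaces A's destructive nested scan (for each left char, find and pop its first match in the right half) by frequency counting: the answer is the sum over distinct right-half characters of the positive excess right.count(c) - left.count(c).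
import Mathlib
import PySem

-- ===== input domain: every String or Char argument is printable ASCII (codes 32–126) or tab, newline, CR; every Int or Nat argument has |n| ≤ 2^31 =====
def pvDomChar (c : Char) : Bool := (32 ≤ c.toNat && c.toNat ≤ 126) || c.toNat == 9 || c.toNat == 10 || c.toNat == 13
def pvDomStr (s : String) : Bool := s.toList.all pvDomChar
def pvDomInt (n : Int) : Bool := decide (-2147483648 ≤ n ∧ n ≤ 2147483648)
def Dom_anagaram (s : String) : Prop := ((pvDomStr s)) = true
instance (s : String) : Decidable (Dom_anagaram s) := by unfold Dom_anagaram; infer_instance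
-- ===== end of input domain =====

-- B replaces A's destructive find-and-pop matching with frequency counting
-- (sum of positive count excesses over the right half); objective: simpler.

-- ===== PORT A =====
-- A's loop 'for i in range(len(left)): if left[i] in right: right.pop(right.index(left[i]))'
-- becomes a foldl over left with the mutable 'right' as accumulator (left[i] over the full
-- index range is exactly the elements of left in order).
def anagaramStepA (r : List Char) (c : Char) : List Char :=
  if c ∈ r then
    match PySem.List.index? r c with
    | some i => ((PySem.List.pop? r (i : Int)).map Prod.snd).getD r
    | none => r
  else r

def anagaram (s : String) : Int :=
  let sl := s.toList
  let n : Int := sl.length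
  if PySem.Int.mod n 2 ≠ 0 then -1
  else
    let mid := PySem.Int.floordiv n 2
    let left := PySem.List.slice sl none (some mid)
    let right := PySem.List.slice sl (some mid) none
    let right' := left.foldl anagaramStepA right
    (right'.length : Int)

-- ===== PORT B =====
def anagaram_alt (s : String) : Int :=
  let sl := s.toList
  let n : Int := sl.length
  if PySem.Int.mod n 2 ≠ 0 then -1
  else
    let mid := PySem.Int.floordiv n 2
    let left := PySem.List.slice sl none (some mid)
    let right := PySem.List.slice sl (some mid) none
    -- sum(max(0, right.count(c) - left.count(c)) for c in set(right)):
    -- an Int sum over the set's elements is order-insensitive, so folding the Set list is exact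
    (PySem.Set.ofList right).foldl
      (fun acc c => acc + max 0 ((right.count c : Int) - (left.count c : Int))) 0

-- ===== PRECONDITION & SPEC =====
def Spec_anagaram (s : String) (out : Int) : Prop := out = anagaram_alt s
instance (s : String) (out : Int) : Decidable (Spec_anagaram s out) := by unfold Spec_anagaram; infer_instance

-- ===== CLAIM (what is proved, stated in full; the proofs are below) =====
def Claim_equal_anagaram : Prop := ∀ (s : String), Dom_anagaram s → Spec_anagaram s (anagaram s)

-- ===== LEMMAS AND PROOFS =====

-- A's loop body removes the first occurrence of c from r (or leaves r alone): it is List.erase.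
theorem stepA_eq_erase (r : List Char) (c : Char) : anagaramStepA r c = r.erase c := by
  unfold anagaramStepA
  rcases hi : PySem.List.index? r c with _ | i
  · have hc : c ∉ r := (PySem.List.index?_eq_none_iff r c).1 hi
    simp [hc, List.erase_of_not_mem hc]
  · obtain ⟨pre, suf, hr, hlen, hnp⟩ := (PySem.List.index?_eq_some_iff (xs := r) (v := c) (k := i)).1 hi
    subst hr
    have hc : c ∈ pre ++ c :: suf := by simp
    rw [if_pos hc]
    have hlt : i < (pre ++ c :: suf).length := by simp; omega
    show ((PySem.List.pop? (pre ++ c :: suf) (i : Int)).map Prod.snd).getD _ = _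
    rw [PySem.List.pop?_natCast _ _ hlt]
    subst hlen
    have he : ∀ (pre suf : List Char), (pre ++ c :: suf).eraseIdx pre.length = pre ++ suf := by
      intro pre
      induction pre with
      | nil => simp
      | cons a pre ih => intro suf; simp [ih]
    simp [he, List.erase_append_right _ hnp]

-- counts after the erasing loop: truncated difference of counts
theorem count_foldl_erase (L R : List Char) (c : Char) :
    (L.foldl (fun r x => r.erase x) R).count c = R.count c - L.count c := by
  induction L generalizing R with
  | nil => simp
  | cons a L ih =>
    simp only [List.foldl_cons, ih, List.count_erase, List.count_cons]
    by_cases h : c = a <;> simp [h] <;> omega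

theorem mem_foldl_erase {x : Char} (L R : List Char)
    (hx : x ∈ L.foldl (fun r y => r.erase y) R) : x ∈ R := by
  induction L generalizing R with
  | nil => simpa using hx
  | cons a L ih => exact List.mem_of_mem_erase (ih _ hx)

-- summing the counts of a nodup superset of l's elements gives l's length
theorem sum_counts_eq_length (ds l : List Char) (hnd : ds.Nodup)
    (hsub : ∀ c ∈ l, c ∈ ds) : (ds.map (fun c => l.count c)).sum = l.length := by
  have h1 : ds.toFinset.sum (fun c => l.count c) = (ds.map (fun c => l.count c)).sum :=
    List.sum_toFinset _ hnd
  have hsubF : l.toFinset ⊆ ds.toFinset := by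
    intro x hx
    simp only [List.mem_toFinset] at hx ⊢
    exact hsub x hx
  have h2 : ∑ c ∈ ds.toFinset, l.count c = ∑ c ∈ l.toFinset, l.count c :=
    (Finset.sum_subset hsubF (by
      intro x _ hx
      simp only [List.mem_toFinset] at hx
      exact List.count_eq_zero_of_not_mem hx)).symm
  have h3 : ∑ c ∈ l.toFinset, l.count c = l.length :=
    List.sum_toFinset_count_eq_length l
  rw [← h1, h2, h3]

-- the core equality on the two halves
theorem cast_sum_nat (ds : List Char) (f : Char → ℕ) :
    (ds.map (fun c => ((f c : ℕ) : Int))).sum = (((ds.map f).sum : ℕ) : Int) := by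
  induction ds with
  | nil => simp
  | cons a ds ih => simp [ih]

theorem core (L R : List Char) :
    ((L.foldl anagaramStepA R).length : Int)
      = (PySem.Set.ofList R).foldl
          (fun acc c => acc + max 0 ((R.count c : Int) - (L.count c : Int))) 0 := by
  have hfun : anagaramStepA = fun r x => r.erase x := by
    funext r x; exact stepA_eq_erase r x
  have hstep : L.foldl anagaramStepA R = L.foldl (fun r x => r.erase x) R := by rw [hfun]
  rw [hstep, PySem.List.foldl_add]
  have hnd : (PySem.Set.ofList R).Nodup := PySem.Set.nodup_ofList R
  have hsub : ∀ c ∈ L.foldl (fun r x => r.erase x) R, c ∈ PySem.Set.ofList R := by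
    intro c hc
    exact (PySem.Set.mem_ofList R c).2 (mem_foldl_erase L R hc)
  have hlen := sum_counts_eq_length (PySem.Set.ofList R) _ hnd hsub
  have hmax : ∀ c : Char, max 0 ((R.count c : Int) - (L.count c : Int))
      = (((R.count c - L.count c : ℕ) : Int)) := by intro c; omega
  calc ((L.foldl (fun r x => r.erase x) R).length : Int)
      = (((PySem.Set.ofList R).map (fun c => (L.foldl (fun r x => r.erase x) R).count c)).sum : ℕ) := by
        rw [hlen]
    _ = (((PySem.Set.ofList R).map (fun c => R.count c - L.count c)).sum : ℕ) := by
        simp only [count_foldl_erase]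
    _ = ((PySem.Set.ofList R).map (fun c => ((R.count c - L.count c : ℕ) : Int))).sum := by
        rw [cast_sum_nat]
    _ = 0 + ((PySem.Set.ofList R).map (fun c => max 0 ((R.count c : Int) - (L.count c : Int)))).sum := by
        simp only [hmax, zero_add]

-- ===== VERDICT (by name: the statement is the Claim_ definition above) =====
theorem anagaram_spec : Claim_equal_anagaram := by
  intro s _
  unfold Spec_anagaram anagaram anagaram_alt
  dsimp only
  split_ifs with h
  · rfl
  · exact (core _ _).symm ▸ rfl
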